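-- pv_equiv track=rewrite | github.com/mcwalker-group/reimagined-octo-funicular | cluster_identification/pep_processing.py | intergenic
-- ===== SOURCE A (Python) =====
-- def intergenic(f, r, coords):
--     inter_f = []
--     inter_r = []
--     for pep in f:
--         trash = 'no'
--         for orf in coords:
--             if pep[0] >= orf[0] and pep[1] <= orf[1]:  #peptide ORF is inside other orf
--                 trash = 'yes'
--             if pep[0] == orf[0] and pep[1] == orf[1]:   #peptide orf is other orf
--                 trash = 'no'
--             #elif pep[0] < orf[0] and pep[1] == orf[1]:     #peptide orf starts before other orf but ends in the same spot
--             #    trash = 'no'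
--             #elif pep[0] < orf[0] and pep[1] > orf[0] and pep[1] - 12 > orf[0]:   #peptide orf starts 5' to other org and overlaps by more than 12 bases
--             #    trash = 'yes'
--             #elif pep[0] < orf[1] and pep[1] > orf[1] and pep[0] + 12 < orf[1]:    #peptide orf ends 3' to other org but starts more than 12 bases inside other orf
--             #    trash = 'yes'
--         if trash == 'no':
--             inter_f.append(pep)
--     for pep in r:
--         trash = 'no'
--         for orf in coords:
--             if pep[0] >= orf[0] and pep[1] <= orf[1]:
--                 trash = 'yes'
--             if pep[0] == orf[0] and pep[1] == orf[1]:   #peptide orf is other orf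
--                 trash = 'no'
--             #elif pep[1] > orf[1] and pep[0] == orf[0]:     #peptide orf starts before other orf but ends in the same spot
--             #    trash = 'no'
--             #elif pep[0] < orf[0] and pep[1] > orf[0] and pep[1] - 12 > orf[0]:
--             #    trash = 'yes'
--             #elif pep[0] < orf[1] and pep[1] > orf[1] and pep[0] + 12 < orf[1]:
--             #    trash = 'yes'
--         if trash == 'no':
--             inter_r.append(pep)
--     return inter_f, inter_r
-- ===== SOURCE B (Python) =====
-- def intergenic(f, r, coords):
--     # A peptide is kept unless an ORF other than itself spans it.  Sort the
--     # ORFs by start and take prefix maxima of their ends; then a spanning ORF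
--     # other than the peptide exists iff some ORF starting strictly before the
--     # peptide ends at or after its end, or some ORF starting at or before the
--     # peptide ends strictly after its end -- two binary searches per peptide.
--     orfs = sorted(coords, key=lambda o: o[0])
--     starts = [o[0] for o in orfs]
--     pmax = []
--     best = None
--     for o in orfs:
--         if best is None or o[1] > best:
--             best = o[1]
--         pmax.append(best)
--
--     def first_at_least(x, strict):
--         # index of the first start >= x (strict) resp. > x (not strict)
--         lo, hi = 0, len(starts)
--         while lo < hi:
--             mid = (lo + hi) // 2
--             if starts[mid] < x or (not strict and starts[mid] == x):
--                 lo = mid + 1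
--             else:
--                 hi = mid
--         return lo
--
--     def keep(p):
--         i1 = first_at_least(p[0], True)
--         i2 = first_at_least(p[0], False)
--         if i1 > 0 and pmax[i1 - 1] >= p[1]:
--             return False
--         if i2 > 0 and pmax[i2 - 1] > p[1]:
--             return False
--         return True
--
--     return [p for p in f if keep(p)], [p for p in r if keep(p)]
-- ===== Notes on version B (the rewrite author's own statement) =====
-- stated objective: alternative
-- what changed: A rescans all of coords for every peptide with a stateful last-write-wins 'trash' flag; B sorts the ORFs by start once, takes prefix maxima of their ends, and decides each peptide with two binary searches for an order-independent 'some other ORF spans it' test (O((P+C) log C) work instead of O(P*C), though a timing run could not verify a speed-up).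
-- intended difference: On inputs where some peptide is spanned by a different ORF but the last ORF of coords containing it is an exact copy of it, A's last reset wins and A keeps the peptide (the result even depends on the order of coords) while B drops it, which is the intended 'not contained within another ORF' filtering described by A's comments. — e.g. on intergenic([(2, 3)], [], [(1, 4), (2, 3)]): A returns ([(2, 3)], []), B returns ([], [])
import Mathlib
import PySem

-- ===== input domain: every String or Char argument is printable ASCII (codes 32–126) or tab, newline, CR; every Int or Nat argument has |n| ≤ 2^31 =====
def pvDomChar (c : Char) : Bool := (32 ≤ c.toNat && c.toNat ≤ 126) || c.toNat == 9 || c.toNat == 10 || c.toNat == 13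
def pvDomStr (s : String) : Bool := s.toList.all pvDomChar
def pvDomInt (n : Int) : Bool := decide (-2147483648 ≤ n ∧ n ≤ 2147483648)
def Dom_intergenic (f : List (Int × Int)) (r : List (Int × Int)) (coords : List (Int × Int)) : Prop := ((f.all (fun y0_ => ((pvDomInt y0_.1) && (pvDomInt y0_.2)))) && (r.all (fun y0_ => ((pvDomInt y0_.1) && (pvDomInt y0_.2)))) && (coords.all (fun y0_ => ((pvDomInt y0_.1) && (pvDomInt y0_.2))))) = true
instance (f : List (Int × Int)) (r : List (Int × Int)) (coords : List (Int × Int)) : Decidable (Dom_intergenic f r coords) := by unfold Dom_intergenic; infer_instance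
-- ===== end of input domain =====

-- B filters peptides by an order-independent "some other ORF spans it" test answered with a
-- sorted ORF list, prefix maxima of ends and two binary searches per peptide; where A's
-- order-dependent inner scan disagrees, D_intergenic states the intended difference.

-- ===== PORT A =====
-- the inner 'for orf in coords' loop with the 'trash' state ('yes'/'no' strings kept as in A);
-- A's f-loop and r-loop have identical live code, so both call this helper
def pvTrashOf (pep : Int × Int) (coords : List (Int × Int)) : String :=
  coords.foldl (fun trash orf =>
    let trash1 := if pep.1 ≥ orf.1 ∧ pep.2 ≤ orf.2 then "yes" else trash
    if pep.1 = orf.1 ∧ pep.2 = orf.2 then "no" else trash1) "no"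

def intergenic (f : List (Int × Int)) (r : List (Int × Int)) (coords : List (Int × Int)) : (List (Int × Int)) × (List (Int × Int)) :=
  let inter_f := f.foldl (fun acc pep => if pvTrashOf pep coords = "no" then acc ++ [pep] else acc) []
  let inter_r := r.foldl (fun acc pep => if pvTrashOf pep coords = "no" then acc ++ [pep] else acc) []
  (inter_f, inter_r)

-- ===== PORT B =====
-- pmax: the running prefix maxima of the sorted ORFs' ends ('best is None or o[1] > best')
def pvPmax (orfs : List (Int × Int)) : List Int :=
  (orfs.foldl (fun acc o =>
      let b := match acc.2 with
        | none => o.2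
        | some v => if o.2 > v then o.2 else v
      (acc.1 ++ [b], some b)) (([] : List Int), (none : Option Int))).1

-- first_at_least(x, strict): Source B's hand-written binary search (A's module imports nothing, so
-- Source B cannot use the bisect module); the fuel argument bounds the 'while lo < hi' iterations
def pvFALLoop (starts : List Int) (x : Int) (strict : Bool) : Nat → Nat → Nat → Nat
  | 0, lo, _hi => lo
  | fuel + 1, lo, hi =>
    if lo < hi then
      let mid := (lo + hi) / 2
      if starts.getD mid 0 < x ∨ (strict = false ∧ starts.getD mid 0 = x) then
        pvFALLoop starts x strict fuel (mid + 1) hi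
      else
        pvFALLoop starts x strict fuel lo mid
    else lo

def pvFirstAtLeast (starts : List Int) (x : Int) (strict : Bool) : Nat :=
  pvFALLoop starts x strict starts.length 0 starts.length

def pvKeepB (starts : List Int) (pmax : List Int) (p : Int × Int) : Bool :=
  let i1 := pvFirstAtLeast starts p.1 true
  let i2 := pvFirstAtLeast starts p.1 false
  if 0 < i1 ∧ pmax.getD (i1 - 1) 0 ≥ p.2 then false
  else if 0 < i2 ∧ pmax.getD (i2 - 1) 0 > p.2 then false
  else true

def intergenic_alt (f : List (Int × Int)) (r : List (Int × Int)) (coords : List (Int × Int)) : (List (Int × Int)) × (List (Int × Int)) :=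
  let orfs := PySem.List.sorted coords (fun o => o.1) false
  let starts := orfs.map (fun o => o.1)
  let pmax := pvPmax orfs
  (f.filter (pvKeepB starts pmax), r.filter (pvKeepB starts pmax))

-- ===== PRECONDITION & SPEC =====
-- On inputs where some peptide of f or r is spanned by a DIFFERENT ORF of coords but the
-- last ORF of coords containing it is an exact copy of it, A's last-write-wins 'trash'
-- reset accidentally KEEPS the peptide although another ORF contains it (the answer even
-- depends on the order of coords); B drops it, which is the intended "not contained
-- within another ORF" filtering A's comments describe.
def D_intergenic (f : List (Int × Int)) (r : List (Int × Int)) (coords : List (Int × Int)) : Prop :=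
  ∃ p ∈ f ++ r,
    (∃ orf ∈ coords, (orf.1 < p.1 ∧ p.2 ≤ orf.2) ∨ (orf.1 ≤ p.1 ∧ p.2 < orf.2)) ∧
    coords.reverse.find? (fun o => decide (o.1 ≤ p.1 ∧ p.2 ≤ o.2)) = some p
instance (f : List (Int × Int)) (r : List (Int × Int)) (coords : List (Int × Int)) : Decidable (D_intergenic f r coords) := by unfold D_intergenic; infer_instance

def Spec_intergenic (f : List (Int × Int)) (r : List (Int × Int)) (coords : List (Int × Int)) (out : (List (Int × Int)) × (List (Int × Int))) : Prop := ¬ D_intergenic f r coords → out = intergenic_alt f r coords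
instance (f : List (Int × Int)) (r : List (Int × Int)) (coords : List (Int × Int)) (out : (List (Int × Int)) × (List (Int × Int))) : Decidable (Spec_intergenic f r coords out) := by unfold Spec_intergenic; infer_instance

def pvDiffWitness_intergenic : (List (Int × Int)) × (List (Int × Int)) × (List (Int × Int)) :=
  ([(2, 3)], [], [(1, 4), (2, 3)])
def pvDiffWitnessOut_intergenic : ((List (Int × Int)) × (List (Int × Int))) × ((List (Int × Int)) × (List (Int × Int))) :=
  (([(2, 3)], []), ([], []))

-- ===== CLAIM (what is proved, stated in full; the proofs are below) =====
def Claim_unchanged_intergenic : Prop := ∀ (f : List (Int × Int)) (r : List (Int × Int)) (coords : List (Int × Int)), Dom_intergenic f r coords → Spec_intergenic f r coords (intergenic f r coords)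
def Claim_changed_intergenic : Prop := Dom_intergenic (pvDiffWitness_intergenic.1) (pvDiffWitness_intergenic.2.1) (pvDiffWitness_intergenic.2.2) ∧ D_intergenic (pvDiffWitness_intergenic.1) (pvDiffWitness_intergenic.2.1) (pvDiffWitness_intergenic.2.2) ∧ intergenic (pvDiffWitness_intergenic.1) (pvDiffWitness_intergenic.2.1) (pvDiffWitness_intergenic.2.2) = pvDiffWitnessOut_intergenic.1 ∧ intergenic_alt (pvDiffWitness_intergenic.1) (pvDiffWitness_intergenic.2.1) (pvDiffWitness_intergenic.2.2) = pvDiffWitnessOut_intergenic.2 ∧ pvDiffWitnessOut_intergenic.1 ≠ pvDiffWitnessOut_intergenic.2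
def Claim_exact_intergenic : Prop := ∀ (f : List (Int × Int)) (r : List (Int × Int)) (coords : List (Int × Int)), Dom_intergenic f r coords → D_intergenic f r coords → intergenic f r coords ≠ intergenic_alt f r coords

-- ===== LEMMAS AND PROOFS =====

-- the last ORF of coords containing p (find? over the reversed list), as in D_intergenic
def pvLastCont (p : Int × Int) (coords : List (Int × Int)) : Option (Int × Int) :=
  coords.reverse.find? (fun o => decide (o.1 ≤ p.1 ∧ p.2 ≤ o.2))

-- "orf spans p and orf ≠ p": definitionally the first condition of D_intergenic
def pvSpanP (p orf : Int × Int) : Prop := (orf.1 < p.1 ∧ p.2 ≤ orf.2) ∨ (orf.1 ≤ p.1 ∧ p.2 < orf.2)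

theorem pvD_iff (f r coords : List (Int × Int)) :
    D_intergenic f r coords ↔
      ∃ p ∈ f ++ r, (∃ orf ∈ coords, pvSpanP p orf) ∧ pvLastCont p coords = some p := Iff.rfl

theorem pvGetD_last {α : Type} (L : List α) (o d : α) : (L ++ [o]).getD L.length d = o := by
  simp [List.getD]

theorem pvGetD_left {α : Type} (L M : List α) (d : α) (i : Nat) (h : i < L.length) :
    (L ++ M).getD i d = L.getD i d := by
  simp [List.getD, List.getElem?_append_left h]

theorem pvGetD_mono (L : List Int) (hp : L.Pairwise (· ≤ ·)) (i j : Nat) (hij : i ≤ j)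
    (hj : j < L.length) : L.getD i 0 ≤ L.getD j 0 := by
  rcases eq_or_lt_of_le hij with rfl | h
  · exact le_refl _
  · rw [List.getD_eq_getElem _ _ (by omega), List.getD_eq_getElem _ _ hj]
    exact List.pairwise_iff_getElem.mp hp i j (by omega) hj h

-- A's inner fold over a snoc step
theorem pvTrash_snoc (p o : Int × Int) (L : List (Int × Int)) :
    pvTrashOf p (L ++ [o]) =
      (if p.1 = o.1 ∧ p.2 = o.2 then "no"
       else if p.1 ≥ o.1 ∧ p.2 ≤ o.2 then "yes" else pvTrashOf p L) := by
  simp [pvTrashOf, List.foldl_append]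

theorem pvLastCont_snoc (p o : Int × Int) (L : List (Int × Int)) :
    pvLastCont p (L ++ [o]) =
      (if o.1 ≤ p.1 ∧ p.2 ≤ o.2 then some o else pvLastCont p L) := by
  by_cases h : o.1 ≤ p.1 ∧ p.2 ≤ o.2 <;>
    simp [pvLastCont, h]

-- core A-side characterisation: A's trash state ends "no" iff the last containing ORF
-- (if any) is an exact copy of p
theorem pvTrash_iff_last (p : Int × Int) (L : List (Int × Int)) :
    pvTrashOf p L = "no" ↔ (pvLastCont p L = none ∨ pvLastCont p L = some p) := by
  induction L using List.reverseRecOn with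
  | nil => simp [pvTrashOf, pvLastCont]
  | append_singleton L o ih =>
    rw [pvTrash_snoc, pvLastCont_snoc]
    by_cases hc : o.1 ≤ p.1 ∧ p.2 ≤ o.2
    · rw [if_pos hc]
      by_cases he : p.1 = o.1 ∧ p.2 = o.2
      · have hpo : p = o := Prod.ext he.1 he.2
        rw [if_pos he]
        simp [hpo]
      · have hne : o ≠ p := fun h => he ⟨(congrArg Prod.fst h).symm, (congrArg Prod.snd h).symm⟩
        rw [if_neg he, if_pos ⟨hc.1, hc.2⟩]
        constructor
        · intro h; exact absurd h (by decide)
        · rintro (h | h)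
          · exact absurd h (by simp)
          · simp at h; exact absurd h hne
    · have he : ¬ (p.1 = o.1 ∧ p.2 = o.2) := fun h => hc ⟨by omega, by omega⟩
      have hge : ¬ (p.1 ≥ o.1 ∧ p.2 ≤ o.2) := fun h => hc ⟨h.1, h.2⟩
      rw [if_neg hc, if_neg he, if_neg hge]
      exact ih

-- a spanning ORF is in particular a containing ORF
theorem pvSpan_cont (p orf : Int × Int) (h : pvSpanP p orf) :
    orf.1 ≤ p.1 ∧ p.2 ≤ orf.2 := by
  unfold pvSpanP at h; omega

-- if no ORF other than p itself spans p, then A keeps p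
theorem pvNoSpan_last (p : Int × Int) (coords : List (Int × Int))
    (h : ∀ orf ∈ coords, ¬ pvSpanP p orf) :
    pvLastCont p coords = none ∨ pvLastCont p coords = some p := by
  cases hfind : pvLastCont p coords with
  | none => exact Or.inl rfl
  | some o =>
    right
    have hmem : o ∈ coords := by
      have := List.mem_of_find?_eq_some hfind
      exact List.mem_reverse.mp this
    have hpred := List.find?_some hfind
    simp at hpred
    have hns := h o hmem
    unfold pvSpanP at hns
    have h1 : o.1 = p.1 := by omega
    have h2 : o.2 = p.2 := by omega
    rw [Prod.ext h1 h2]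

-- a spanning ORF forces the last containing ORF to exist
theorem pvSpan_lastCont_ne_none (p : Int × Int) (coords : List (Int × Int))
    (orf : Int × Int) (hmem : orf ∈ coords) (hsp : pvSpanP p orf) :
    pvLastCont p coords ≠ none := by
  intro hn
  have := List.find?_eq_none.mp hn orf (List.mem_reverse.mpr hmem)
  have hc := pvSpan_cont p orf hsp
  simp at this
  omega

-- A's per-peptide test is false wherever B finds a spanning ORF, unless D_ fires
theorem pvTrash_of_span (p : Int × Int) (coords : List (Int × Int))
    (hspan : ∃ orf ∈ coords, pvSpanP p orf)
    (hnd : pvLastCont p coords ≠ some p) : pvTrashOf p coords ≠ "no" := by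
  intro h
  rcases (pvTrash_iff_last p coords).mp h with hn | hs
  · obtain ⟨orf, hm, hsp⟩ := hspan
    exact pvSpan_lastCont_ne_none p coords orf hm hsp hn
  · exact hnd hs

-- binary-search loop invariant: the result splits starts at the searched condition
theorem pvFAL_inv (starts : List Int) (x : Int) (strict : Bool)
    (hp : starts.Pairwise (· ≤ ·)) :
    ∀ fuel lo hi, hi - lo ≤ fuel → lo ≤ hi → hi ≤ starts.length →
      (∀ j, j < lo → (starts.getD j 0 < x ∨ (strict = false ∧ starts.getD j 0 = x))) →
      (∀ j, hi ≤ j → j < starts.length → ¬ (starts.getD j 0 < x ∨ (strict = false ∧ starts.getD j 0 = x))) →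
      lo ≤ pvFALLoop starts x strict fuel lo hi ∧ pvFALLoop starts x strict fuel lo hi ≤ hi ∧
        ∀ j, j < starts.length →
          (j < pvFALLoop starts x strict fuel lo hi ↔ (starts.getD j 0 < x ∨ (strict = false ∧ starts.getD j 0 = x))) := by
  intro fuel
  induction fuel with
  | zero =>
    intro lo hi h1 h2 _ hlow hhigh
    have hlh : lo = hi := by omega
    simp only [pvFALLoop]
    subst hlh
    refine ⟨le_refl _, le_refl _, fun j hj => ⟨fun h => hlow j h, fun hC => ?_⟩⟩
    by_contra hnj
    exact hhigh j (by omega) hj hC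
  | succ fuel ih =>
    intro lo hi h1 h2 h3 hlow hhigh
    simp only [pvFALLoop]
    by_cases hlh : lo < hi
    · rw [if_pos hlh]
      have hmlo : lo ≤ (lo + hi) / 2 := by omega
      have hmhi : (lo + hi) / 2 < hi := by omega
      by_cases hcm : starts.getD ((lo + hi) / 2) 0 < x ∨ (strict = false ∧ starts.getD ((lo + hi) / 2) 0 = x)
      · rw [if_pos hcm]
        have hnew : ∀ j, j < (lo + hi) / 2 + 1 → (starts.getD j 0 < x ∨ (strict = false ∧ starts.getD j 0 = x)) := by
          intro j hj
          rcases Nat.lt_or_ge j lo with hjlo | hjlo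
          · exact hlow j hjlo
          · have hmono : starts.getD j 0 ≤ starts.getD ((lo + hi) / 2) 0 :=
              pvGetD_mono starts hp j _ (by omega) (by omega)
            rcases hcm with h | ⟨hs, h⟩
            · left; omega
            · by_cases hlt : starts.getD j 0 < x
              · left; exact hlt
              · right; exact ⟨hs, by omega⟩
        obtain ⟨ha, hb, hc⟩ := ih ((lo + hi) / 2 + 1) hi (by omega) (by omega) h3 hnew hhigh
        exact ⟨by omega, by omega, hc⟩
      · rw [if_neg hcm]
        have hnew : ∀ j, (lo + hi) / 2 ≤ j → j < starts.length → ¬ (starts.getD j 0 < x ∨ (strict = false ∧ starts.getD j 0 = x)) := by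
          intro j hmj hjlen hCj
          rcases Nat.lt_or_ge j hi with hjhi | hjhi
          · have hmono : starts.getD ((lo + hi) / 2) 0 ≤ starts.getD j 0 :=
              pvGetD_mono starts hp _ j (by omega) hjlen
            apply hcm
            rcases hCj with h | ⟨hs, h⟩
            · left; omega
            · by_cases hlt : starts.getD ((lo + hi) / 2) 0 < x
              · left; exact hlt
              · right; exact ⟨hs, by omega⟩
          · exact hhigh j hjhi hjlen hCj
        obtain ⟨ha, hb, hc⟩ := ih lo ((lo + hi) / 2) (by omega) (by omega) (by omega) hlow hnew
        exact ⟨by omega, by omega, hc⟩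
    · rw [if_neg hlh]
      have hle : lo = hi := by omega
      subst hle
      refine ⟨le_refl _, le_refl _, fun j hj => ⟨fun h => hlow j h, fun hC => ?_⟩⟩
      by_contra hnj
      exact hhigh j (by omega) hj hC

-- prefix-maxima characterisation: pmax[i-1] bounds and attains the ends of the first i ORFs
theorem pvPmax_spec (L : List (Int × Int)) :
    (pvPmax L).length = L.length ∧
    ∀ i, 0 < i → i ≤ L.length →
      (∀ j, j < i → (L.getD j (0, 0)).2 ≤ (pvPmax L).getD (i - 1) 0) ∧
      (∃ j, j < i ∧ (pvPmax L).getD (i - 1) 0 = (L.getD j (0, 0)).2) := by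
  have main : ∀ (L : List (Int × Int)),
      (pvPmax L).length = L.length ∧
      ((L.foldl (fun acc o =>
        let b := match acc.2 with
          | none => o.2
          | some v => if o.2 > v then o.2 else v
        (acc.1 ++ [b], some b)) (([] : List Int), (none : Option Int))).2 =
        if L.length = 0 then none else some ((pvPmax L).getD (L.length - 1) 0)) ∧
      ∀ i, 0 < i → i ≤ L.length →
        (∀ j, j < i → (L.getD j (0, 0)).2 ≤ (pvPmax L).getD (i - 1) 0) ∧
        (∃ j, j < i ∧ (pvPmax L).getD (i - 1) 0 = (L.getD j (0, 0)).2) := by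
    intro L
    induction L using List.reverseRecOn with
    | nil => exact ⟨rfl, rfl, fun i h0 hle => absurd h0 (by simp at hle; omega)⟩
    | append_singleton L o ih =>
      obtain ⟨hlen, hsnd, hspec⟩ := ih
      have hfold : (L ++ [o]).foldl (fun acc o =>
          let b := match acc.2 with
            | none => o.2
            | some v => if o.2 > v then o.2 else v
          (acc.1 ++ [b], some b)) (([] : List Int), (none : Option Int)) =
          let s := L.foldl (fun acc o =>
            let b := match acc.2 with
              | none => o.2
              | some v => if o.2 > v then o.2 else v
            (acc.1 ++ [b], some b)) (([] : List Int), (none : Option Int))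
          let b := match s.2 with
            | none => o.2
            | some v => if o.2 > v then o.2 else v
          (s.1 ++ [b], some b) := by
        rw [List.foldl_append]; rfl
      by_cases h0 : L.length = 0
      · have hLnil : L = [] := List.length_eq_zero_iff.mp h0
        subst hLnil
        refine ⟨by simp [pvPmax], by simp [pvPmax], ?_⟩
        intro i hi0 hile
        have : i = 1 := by simp at hile; omega
        subst this
        constructor
        · intro j hj
          have : j = 0 := by omega
          subst this
          simp [pvPmax]
        · exact ⟨0, by omega, by simp [pvPmax]⟩
      · -- L nonempty: the carried best is the last prefix maximum
        rw [if_neg h0] at hsnd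
        set m := (pvPmax L).getD (L.length - 1) 0 with hm
        have hstate : L.foldl (fun acc o =>
            let b := match acc.2 with
              | none => o.2
              | some v => if o.2 > v then o.2 else v
            (acc.1 ++ [b], some b)) (([] : List Int), (none : Option Int)) =
            (pvPmax L, some m) := Prod.ext rfl hsnd
        set b := if o.2 > m then o.2 else m with hb
        have hmb : m ≤ b ∧ o.2 ≤ b ∧ (b = m ∨ b = o.2) := by
          rw [hb]; split_ifs with h <;> omega
        have hpm : pvPmax (L ++ [o]) = pvPmax L ++ [b] := by
          unfold pvPmax
          rw [List.foldl_append, hstate]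
          rw [hb]
          simp
        have hlen' : (pvPmax (L ++ [o])).length = (L ++ [o]).length := by
          rw [hpm]; simp [hlen]
        refine ⟨hlen', ?_, ?_⟩
        · rw [if_neg (by simp), hpm]
          have h1 : (L ++ [o]).length - 1 = (pvPmax L).length := by simp [hlen]
          rw [h1, pvGetD_last, List.foldl_append, hstate]
          rw [hb]
          simp
        · intro i hi0 hile
          rcases Nat.lt_or_ge (i - 1) L.length with hiL | hiL
          · -- i ≤ L.length: inherited
            have hîle : i ≤ L.length := by omega
            have hgd : (pvPmax (L ++ [o])).getD (i - 1) 0 = (pvPmax L).getD (i - 1) 0 := by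
              rw [hpm, pvGetD_left _ _ _ _ (by omega : i - 1 < (pvPmax L).length)]
            obtain ⟨hbnd, j, hj, hval⟩ := hspec i hi0 hîle
            constructor
            · intro j' hj'
              rw [hgd, pvGetD_left _ _ _ _ (by omega : j' < L.length)]
              exact hbnd j' hj'
            · exact ⟨j, hj, by rw [hgd, pvGetD_left _ _ _ _ (by omega : j < L.length)]; exact hval⟩
          · -- i = L.length + 1: the new cell b
            have hieq : i = L.length + 1 := by simp at hile; omega
            have hgd : (pvPmax (L ++ [o])).getD (i - 1) 0 = b := by
              rw [hpm, hieq]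
              have : L.length + 1 - 1 = (pvPmax L).length := by omega
              rw [this]
              exact pvGetD_last _ _ _
            obtain ⟨hbnd, jw, hjw, hvw⟩ := hspec L.length (by omega) (le_refl _)
            have hmL : L.length - 1 + 1 = L.length := by omega
            constructor
            · intro j hj
              rcases Nat.lt_or_ge j L.length with hjL | hjL
              · rw [hgd, pvGetD_left _ _ _ _ hjL]
                have := hbnd j (by omega)
                omega
              · have : j = L.length := by omega
                subst this
                rw [hgd, pvGetD_last]
                omega
            · rcases hmb.2.2 with hbm | hbo
              · refine ⟨jw, by omega, ?_⟩
                rw [hgd, hbm, pvGetD_left _ _ _ _ (by omega : jw < L.length)]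
                exact hvw
              · refine ⟨L.length, by omega, ?_⟩
                rw [hgd, hbo, pvGetD_last]
  exact ⟨(main L).1, (main L).2.2⟩

-- B's keep test decides "no ORF of coords spans p"
theorem pvKeepB_iff (coords : List (Int × Int)) (p : Int × Int) :
    pvKeepB ((PySem.List.sorted coords (fun o => o.1) false).map (fun o => o.1))
        (pvPmax (PySem.List.sorted coords (fun o => o.1) false)) p = true ↔
      ∀ orf ∈ coords, ¬ pvSpanP p orf := by
  set orfs := PySem.List.sorted coords (fun o => o.1) false with horfs
  have hperm : orfs.Perm coords := PySem.List.sorted_perm coords _ _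
  have hpair : orfs.Pairwise (fun a b => a.1 ≤ b.1) := PySem.List.sorted_pairwise coords _
  set starts := orfs.map (fun o => o.1) with hstarts
  have hps : starts.Pairwise (· ≤ ·) := by
    rw [hstarts, List.pairwise_map]; exact hpair
  have hsl : starts.length = orfs.length := by rw [hstarts]; exact List.length_map _
  have hsg : ∀ j, j < orfs.length → starts.getD j 0 = (orfs.getD j (0, 0)).1 := by
    intro j hj
    have hj' : j < starts.length := by omega
    rw [List.getD_eq_getElem _ _ hj', List.getD_eq_getElem _ _ hj]
    simp only [hstarts, List.getElem_map]
  obtain ⟨hpl, hpspec⟩ := pvPmax_spec orfs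
  -- the two binary searches
  have h1 := pvFAL_inv starts p.1 true hps starts.length 0 starts.length (by omega) (by omega)
    (le_refl _) (by intro j hj; omega) (by intro j hj hjl; omega)
  have h2 := pvFAL_inv starts p.1 false hps starts.length 0 starts.length (by omega) (by omega)
    (le_refl _) (by intro j hj; omega) (by intro j hj hjl; omega)
  set i1 := pvFALLoop starts p.1 true starts.length 0 starts.length with hi1
  set i2 := pvFALLoop starts p.1 false starts.length 0 starts.length with hi2
  obtain ⟨-, h1le, h1iff⟩ := h1
  obtain ⟨-, h2le, h2iff⟩ := h2
  have h1iff' : ∀ j, j < orfs.length → (j < i1 ↔ (orfs.getD j (0, 0)).1 < p.1) := by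
    intro j hj
    rw [← hsg j hj]
    have := h1iff j (by omega)
    simpa using this
  have h2iff' : ∀ j, j < orfs.length → (j < i2 ↔ (orfs.getD j (0, 0)).1 ≤ p.1) := by
    intro j hj
    rw [← hsg j hj]
    have := h2iff j (by omega)
    constructor
    · intro hlt
      have := this.mp hlt
      rcases this with h | ⟨-, h⟩ <;> omega
    · intro hle
      apply this.mpr
      rcases lt_or_eq_of_le hle with h | h
      · left; exact h
      · right; exact ⟨rfl, h⟩
  -- condition 1 names the strictly-earlier spanning ORFs
  have T1 : (0 < i1 ∧ (pvPmax orfs).getD (i1 - 1) 0 ≥ p.2) ↔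
      (∃ orf ∈ orfs, orf.1 < p.1 ∧ p.2 ≤ orf.2) := by
    constructor
    · rintro ⟨hpos, hge⟩
      obtain ⟨hbnd, j, hj, hval⟩ := hpspec i1 hpos (by omega)
      refine ⟨orfs.getD j (0, 0), ?_, ?_, by omega⟩
      · rw [List.getD_eq_getElem _ _ (by omega)]; exact List.getElem_mem _
      · exact (h1iff' j (by omega)).mp hj
    · rintro ⟨orf, hmem, hlt, hle⟩
      obtain ⟨j, hj, hje⟩ := List.mem_iff_getElem.mp hmem
      have hjd : orfs.getD j (0, 0) = orf := by rw [List.getD_eq_getElem _ _ hj]; exact hje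
      have hji : j < i1 := (h1iff' j hj).mpr (by rw [hjd]; exact hlt)
      obtain ⟨hbnd, -⟩ := hpspec i1 (by omega) (by omega)
      have := hbnd j hji
      rw [hjd] at this
      exact ⟨by omega, by omega⟩
  have T2 : (0 < i2 ∧ (pvPmax orfs).getD (i2 - 1) 0 > p.2) ↔
      (∃ orf ∈ orfs, orf.1 ≤ p.1 ∧ p.2 < orf.2) := by
    constructor
    · rintro ⟨hpos, hgt⟩
      obtain ⟨hbnd, j, hj, hval⟩ := hpspec i2 hpos (by omega)
      refine ⟨orfs.getD j (0, 0), ?_, ?_, by omega⟩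
      · rw [List.getD_eq_getElem _ _ (by omega)]; exact List.getElem_mem _
      · exact (h2iff' j (by omega)).mp hj
    · rintro ⟨orf, hmem, hle, hlt⟩
      obtain ⟨j, hj, hje⟩ := List.mem_iff_getElem.mp hmem
      have hjd : orfs.getD j (0, 0) = orf := by rw [List.getD_eq_getElem _ _ hj]; exact hje
      have hji : j < i2 := (h2iff' j hj).mpr (by rw [hjd]; exact hle)
      obtain ⟨hbnd, -⟩ := hpspec i2 (by omega) (by omega)
      have := hbnd j hji
      rw [hjd] at this
      exact ⟨by omega, by omega⟩
  -- assemble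
  unfold pvKeepB
  rw [show pvFirstAtLeast starts p.1 true = i1 from rfl,
    show pvFirstAtLeast starts p.1 false = i2 from rfl]
  constructor
  · intro hkeep orf hmem hspan
    have hmem' : orf ∈ orfs := hperm.mem_iff.mpr hmem
    rcases hspan with h | h
    · have := T1.mpr ⟨orf, hmem', h⟩
      rw [if_pos this] at hkeep
      exact absurd hkeep (by decide)
    · have := T2.mpr ⟨orf, hmem', h⟩
      by_cases hc1 : 0 < i1 ∧ (pvPmax orfs).getD (i1 - 1) 0 ≥ p.2
      · rw [if_pos hc1] at hkeep; exact absurd hkeep (by decide)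
      · rw [if_neg hc1, if_pos this] at hkeep; exact absurd hkeep (by decide)
  · intro hns
    have hn1 : ¬ (0 < i1 ∧ (pvPmax orfs).getD (i1 - 1) 0 ≥ p.2) := by
      rw [T1]
      rintro ⟨orf, hmem, h⟩
      exact hns orf (hperm.mem_iff.mp hmem) (Or.inl h)
    have hn2 : ¬ (0 < i2 ∧ (pvPmax orfs).getD (i2 - 1) 0 > p.2) := by
      rw [T2]
      rintro ⟨orf, hmem, h⟩
      exact hns orf (hperm.mem_iff.mp hmem) (Or.inr h)
    rw [if_neg hn1, if_neg hn2]

-- strict monotonicity of countP: pointwise implication plus one strict witness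
theorem pvCountP_lt {α : Type} (p q : α → Bool) (l : List α)
    (hpq : ∀ x ∈ l, q x = true → p x = true) (x : α) (hx : x ∈ l)
    (hp : p x = true) (hq : q x = false) : l.countP q < l.countP p := by
  induction l with
  | nil => exact absurd hx (List.not_mem_nil)
  | cons a t ih =>
    rw [List.countP_cons, List.countP_cons]
    rcases List.mem_cons.mp hx with rfl | hxt
    · have hle := List.countP_mono_left (p := q) (q := p) (l := t)
        (fun y hy => hpq y (List.mem_cons_of_mem _ hy))
      rw [hp, hq]
      simp
      omega
    · have hlt := ih (fun y hy => hpq y (List.mem_cons_of_mem _ hy)) hxt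
      have : (if q a = true then 1 else 0) ≤ (if p a = true then 1 else 0) := by
        by_cases hqa : q a = true
        · rw [if_pos hqa, if_pos (hpq a List.mem_cons_self hqa)]
        · rw [if_neg hqa]; omega
      omega

-- both ports compute filters over the same respective per-peptide tests
theorem pvIntergenic_eq_filter (f r coords : List (Int × Int)) :
    intergenic f r coords =
      (f.filter (fun pep => decide (pvTrashOf pep coords = "no")),
       r.filter (fun pep => decide (pvTrashOf pep coords = "no"))) := by
  unfold intergenic
  have hfold : ∀ (xs : List (Int × Int)),
      xs.foldl (fun acc pep => if pvTrashOf pep coords = "no" then acc ++ [pep] else acc) [] =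
      xs.filter (fun pep => decide (pvTrashOf pep coords = "no")) := by
    intro xs
    have := PySem.List.foldl_append_if (fun pep => decide (pvTrashOf pep coords = "no"))
      (fun x => x) xs []
    simp only [decide_eq_true_eq, List.map_id', List.nil_append] at this
    rw [this]
  simp only [hfold]

-- B's per-peptide test implies A's
theorem pvKeepB_imp_trash (coords : List (Int × Int)) (p : Int × Int)
    (h : pvKeepB ((PySem.List.sorted coords (fun o => o.1) false).map (fun o => o.1))
        (pvPmax (PySem.List.sorted coords (fun o => o.1) false)) p = true) :
    pvTrashOf p coords = "no" := by
  exact (pvTrash_iff_last p coords).mpr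
    (pvNoSpan_last p coords ((pvKeepB_iff coords p).mp h))

-- ===== VERDICT (by name: the statement is the Claim_ definition above) =====
theorem intergenic_spec : Claim_unchanged_intergenic := by
  intro f r coords _ hD
  show _ = _
  rw [pvIntergenic_eq_filter]
  unfold intergenic_alt
  rw [pvD_iff] at hD
  push_neg at hD
  have hpt : ∀ x ∈ f ++ r,
      (fun pep => decide (pvTrashOf pep coords = "no")) x =
      pvKeepB ((PySem.List.sorted coords (fun o => o.1) false).map (fun o => o.1))
        (pvPmax (PySem.List.sorted coords (fun o => o.1) false)) x := by
    intro x hx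
    cases hkb : pvKeepB ((PySem.List.sorted coords (fun o => o.1) false).map (fun o => o.1))
        (pvPmax (PySem.List.sorted coords (fun o => o.1) false)) x with
    | true =>
      simp only [decide_eq_true_eq]
      exact pvKeepB_imp_trash coords x hkb
    | false =>
      have hspan : ∃ orf ∈ coords, pvSpanP x orf := by
        by_contra hno
        push_neg at hno
        have : pvKeepB _ _ x = true := (pvKeepB_iff coords x).mpr (fun orf hm => hno orf hm)
        rw [hkb] at this
        exact absurd this (by decide)
      have hnak := hD x hx hspan
      simpa using pvTrash_of_span x coords hspan hnak
  have hf : ∀ x ∈ f, (fun pep => decide (pvTrashOf pep coords = "no")) x =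
      pvKeepB ((PySem.List.sorted coords (fun o => o.1) false).map (fun o => o.1))
        (pvPmax (PySem.List.sorted coords (fun o => o.1) false)) x :=
    fun x hx => hpt x (List.mem_append_left _ hx)
  have hr : ∀ x ∈ r, (fun pep => decide (pvTrashOf pep coords = "no")) x =
      pvKeepB ((PySem.List.sorted coords (fun o => o.1) false).map (fun o => o.1))
        (pvPmax (PySem.List.sorted coords (fun o => o.1) false)) x :=
    fun x hx => hpt x (List.mem_append_right _ hx)
  exact Prod.ext (List.filter_congr hf) (List.filter_congr hr)

theorem intergenic_changed : Claim_changed_intergenic := by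
  unfold Claim_changed_intergenic; decide

theorem intergenic_tight : Claim_exact_intergenic := by
  intro f r coords _ hD heq
  rw [pvD_iff] at hD
  obtain ⟨p, hpmem, hspan, hak⟩ := hD
  set kB := pvKeepB ((PySem.List.sorted coords (fun o => o.1) false).map (fun o => o.1))
    (pvPmax (PySem.List.sorted coords (fun o => o.1) false)) with hkB
  set pA := (fun pep => decide (pvTrashOf pep coords = "no")) with hpA
  have himp : ∀ x ∈ f ++ r, kB x = true → pA x = true := by
    intro x _ h
    exact decide_eq_true (pvKeepB_imp_trash coords x h)
  have hpa : pA p = true := decide_eq_true ((pvTrash_iff_last p coords).mpr (Or.inr hak))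
  have hkb : kB p = false := by
    cases h : kB p with
    | false => rfl
    | true =>
      obtain ⟨orf, hm, hsp⟩ := hspan
      exact absurd hsp ((pvKeepB_iff coords p).mp (by rw [hkB] at h; exact h) orf hm)
  rw [pvIntergenic_eq_filter] at heq
  unfold intergenic_alt at heq
  rcases List.mem_append.mp hpmem with hpf | hpr
  · have h1 : f.filter pA = f.filter kB := congrArg Prod.fst heq
    have hlt := pvCountP_lt pA kB f (fun x hx => himp x (List.mem_append_left _ hx)) p hpf hpa hkb
    have : (f.filter pA).length = (f.filter kB).length := by rw [h1]
    rw [← List.countP_eq_length_filter, ← List.countP_eq_length_filter] at this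
    omega
  · have h1 : r.filter pA = r.filter kB := congrArg Prod.snd heq
    have hlt := pvCountP_lt pA kB r (fun x hx => himp x (List.mem_append_right _ hx)) p hpr hpa hkb
    have : (r.filter pA).length = (r.filter kB).length := by rw [h1]
    rw [← List.countP_eq_length_filter, ← List.countP_eq_length_filter] at this
    omega
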